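-- pv_equiv track=rewrite | github.com/maux96/DAA-problema-1 | solucion_memo.py | get_matrices
-- ===== SOURCE A (Python) =====
-- def get_matrices(A: list[int], class_count):
--     mat: list[list[int]] = [[] for _ in range(class_count)]
--     quantity_mat = []
--     frec = [0] * class_count
--     for i in range(len(A)):
--         mat[A[i]-1].append(i)
--
--         current_quantitys = [0] *class_count
--         for j in range(class_count):
--             current_quantitys[j]=frec[j]
--         quantity_mat.append( current_quantitys)
--
--         frec[A[i]-1]+=1
--
--     return mat, quantity_mat
-- ===== SOURCE B (Python) =====
-- def get_matrices(A: list[int], class_count):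
--     # Phase 1: group indices by class (same wrap/IndexError behaviour as indexing A[i]-1).
--     mat: list[list[int]] = [[] for _ in range(class_count)]
--     for i in range(len(A)):
--         mat[A[i] - 1].append(i)
--     # Phase 2: derive each frequency snapshot from the grouped indices:
--     # row i, column c = how many occurrences of class c happened strictly before step i.
--     quantity_mat = [[sum(1 for x in mat[c] if x < i) for c in range(class_count)]
--                     for i in range(len(A))]
--     return mat, quantity_mat
-- ===== Notes on version B (the rewrite author's own statement) =====
-- stated objective: alternative
-- what changed: B keeps A's grouping pass but drops the running frequency vector and its per-step copy loop entirely: each quantity_mat row is derived afterwards from the grouped index lists mat by counting, per class, the occurrence indices smaller than the current step.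
import Mathlib
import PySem

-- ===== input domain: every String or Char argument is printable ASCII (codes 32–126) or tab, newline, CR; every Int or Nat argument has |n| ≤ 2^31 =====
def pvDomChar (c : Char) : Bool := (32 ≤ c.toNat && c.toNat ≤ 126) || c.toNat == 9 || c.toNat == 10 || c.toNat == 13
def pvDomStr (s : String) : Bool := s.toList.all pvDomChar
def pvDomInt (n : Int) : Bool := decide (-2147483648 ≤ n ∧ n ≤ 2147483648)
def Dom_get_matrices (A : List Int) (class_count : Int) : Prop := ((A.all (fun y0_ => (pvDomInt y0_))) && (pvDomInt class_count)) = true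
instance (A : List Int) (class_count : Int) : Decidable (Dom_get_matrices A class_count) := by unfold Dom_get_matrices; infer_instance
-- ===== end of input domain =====

-- B (phase 2) derives each frequency snapshot from the grouped index lists instead of
-- copying a running frequency vector at every step; equivalence of the RETURN value is proved.

-- ===== PORT A =====
-- xs[i] = f(xs[i]) with Python's negative-index rule; an out-of-range index is an
-- IndexError in Python (excluded by Pre_) and leaves xs unchanged here.
def pvModAt {α : Type} (xs : List α) (i : Int) (d : α) (f : α → α) : List α :=
  PySem.List.pySetD xs i (f (PySem.List.pyGetD xs i d))

-- body of A's single loop over i in range(len(A)); state = (mat, quantity_mat, frec)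
def pvStepA (A : List Int) (class_count : Int)
    (st : List (List Int) × List (List Int) × List Int) (i : Int) :
    List (List Int) × List (List Int) × List Int :=
  let mat := st.1
  let quantity_mat := st.2.1
  let frec := st.2.2
  -- mat[A[i]-1].append(i)
  let mat := pvModAt mat (PySem.List.pyGetD A i 0 - 1) [] (fun row => row ++ [i])
  -- current_quantitys = [0]*class_count; for j in range(class_count): current_quantitys[j] = frec[j]
  let current_quantitys :=
    (PySem.List.pyRange 0 class_count 1).foldl
      (fun cq j => PySem.List.pySetD cq j (PySem.List.pyGetD frec j 0))
      (List.replicate class_count.toNat (0 : Int))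
  let quantity_mat := quantity_mat ++ [current_quantitys]
  -- frec[A[i]-1] += 1
  let frec := pvModAt frec (PySem.List.pyGetD A i 0 - 1) 0 (fun x => x + 1)
  (mat, quantity_mat, frec)

def get_matrices (A : List Int) (class_count : Int) : List (List Int) × List (List Int) :=
  let st := (PySem.List.pyRange 0 (A.length : Int) 1).foldl (pvStepA A class_count)
    (List.replicate class_count.toNat [], [], List.replicate class_count.toNat (0 : Int))
  (st.1, st.2.1)

-- ===== PORT B =====
def get_matrices_alt (A : List Int) (class_count : Int) : List (List Int) × List (List Int) :=
  -- Phase 1: group indices by class (same indexing as A's mat pass)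
  let mat := (PySem.List.pyRange 0 (A.length : Int) 1).foldl
    (fun mat i => pvModAt mat (PySem.List.pyGetD A i 0 - 1) [] (fun row => row ++ [i]))
    (List.replicate class_count.toNat [])
  -- Phase 2: quantity_mat[i][c] = sum(1 for x in mat[c] if x < i)
  let quantity_mat := (PySem.List.pyRange 0 (A.length : Int) 1).map (fun i =>
    (PySem.List.pyRange 0 class_count 1).map (fun c =>
      (PySem.List.pyGetD mat c []).foldl (fun s x => if x < i then s + 1 else s) (0 : Int)))
  (mat, quantity_mat)

-- ===== PRECONDITION & SPEC =====
-- Pre_ excludes exactly the inputs where Python raises IndexError: some A[i]-1 is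
-- outside Python's (wrap-around) index range for a list of class_count lists.
def Pre_get_matrices (A : List Int) (class_count : Int) : Prop :=
  ∀ a ∈ A, -class_count ≤ a - 1 ∧ a - 1 < class_count
instance (A : List Int) (class_count : Int) : Decidable (Pre_get_matrices A class_count) := by
  unfold Pre_get_matrices; infer_instance

def pvWitness_get_matrices : List Int × Int := ([1, 3, 0, 1], 3)

def Spec_get_matrices (A : List Int) (class_count : Int) (out : List (List Int) × List (List Int)) : Prop := out = get_matrices_alt A class_count
instance (A : List Int) (class_count : Int) (out : List (List Int) × List (List Int)) : Decidable (Spec_get_matrices A class_count out) := by unfold Spec_get_matrices; infer_instance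

-- ===== CLAIM (what is proved, stated in full; the proofs are below) =====
def Claim_equal_get_matrices : Prop := ∀ (A : List Int) (class_count : Int), Dom_get_matrices A class_count → Pre_get_matrices A class_count → Spec_get_matrices A class_count (get_matrices A class_count)

-- ===== LEMMAS AND PROOFS =====

-- effective Nat index of Python index i into a list of length K (matches pyIdx? in range)
def pvNidx (K : Nat) (i : Int) : Nat := if 0 ≤ i then i.toNat else K - (-i).toNat

-- occurrence list of class c in X, indices counted from s
def pvOcc (K : Nat) (c : Nat) (X : List Int) (s : Nat) : List Int :=
  ((X.zipIdx s).filter (fun p => pvNidx K (p.1 - 1) == c)).map (fun p => ((p.2 : Nat) : Int))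

def pvFrec (K : Nat) (X : List Int) : List Int :=
  (List.range K).map (fun c => (X.countP (fun a => pvNidx K (a - 1) == c) : Int))

def pvMat (K : Nat) (X : List Int) : List (List Int) :=
  (List.range K).map (fun c => pvOcc K c X 0)

def pvQmat (K : Nat) (X : List Int) : List (List Int) :=
  (List.range X.length).map (fun i => pvFrec K (X.take i))

lemma pvNidx_lt (K : Nat) (i : Int) (h1 : -(K : Int) ≤ i) (h2 : i < K) : pvNidx K i < K := by
  unfold pvNidx; split <;> omega

lemma pvGetD_inrange {α : Type} (xs : List α) (i : Int) (d : α)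
    (h1 : -(xs.length : Int) ≤ i) (h2 : i < xs.length) :
    PySem.List.pyGetD xs i d = xs.getD (pvNidx xs.length i) d := by
  unfold pvNidx
  simp only [PySem.List.pyGetD, PySem.List.pyGet?, PySem.List.pyIdx?]
  split_ifs <;> simp [List.getD_eq_getElem?_getD]

lemma pvSetD_inrange {α : Type} (xs : List α) (i : Int) (v : α)
    (h1 : -(xs.length : Int) ≤ i) (h2 : i < xs.length) :
    PySem.List.pySetD xs i v = xs.set (pvNidx xs.length i) v := by
  unfold pvNidx
  simp only [PySem.List.pySetD, PySem.List.pySet?, PySem.List.pyIdx?]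
  split_ifs <;> simp

lemma pvModAt_inrange {α : Type} (xs : List α) (K : Nat) (hlen : xs.length = K)
    (i : Int) (d : α) (f : α → α) (h1 : -(K : Int) ≤ i) (h2 : i < K) :
    pvModAt xs i d f = xs.set (pvNidx K i) (f (xs.getD (pvNidx K i) d)) := by
  subst hlen
  unfold pvModAt
  rw [pvGetD_inrange xs i d h1 h2, pvSetD_inrange xs i _ h1 h2]

-- the copy loop writes xs back, position by position
lemma pvCopyAux (xs : List Int) (m : Nat) (hm : m ≤ xs.length) (cq : List Int)
    (hcq : cq.length = xs.length) :
    (PySem.List.pyRange 0 (m : Int) 1).foldl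
      (fun cq j => PySem.List.pySetD cq j (PySem.List.pyGetD xs j 0)) cq =
      xs.take m ++ cq.drop m := by
  induction m with
  | zero => simp [PySem.List.pyRange_one_eq_nil]
  | succ m ih =>
    have h1 : ((m : Int) + 1) = ((m + 1 : Nat) : Int) := by push_cast; ring
    rw [← h1, PySem.List.pyRange_one_succ_right (by positivity), List.foldl_append,
      ih (by omega)]
    simp only [List.foldl_cons, List.foldl_nil, PySem.List.pySetD_natCast,
      PySem.List.pyGetD_natCast]
    have hml : m < xs.length := by omega
    rw [List.set_append_right m _ (by simp [List.length_take]),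
      List.drop_eq_getElem_cons (by omega : m < cq.length)]
    simp only [List.length_take, Nat.min_eq_left (by omega : m ≤ xs.length), Nat.sub_self,
      List.set_cons_zero]
    rw [List.getD_eq_getElem?_getD, List.getElem?_eq_getElem hml]
    simp only [Option.getD_some]
    rw [List.append_cons, List.take_concat_get' xs m hml]

lemma pvCopy (k : Int) (xs : List Int) (h : xs.length = k.toNat) :
    (PySem.List.pyRange 0 k 1).foldl
      (fun cq j => PySem.List.pySetD cq j (PySem.List.pyGetD xs j 0))
      (List.replicate k.toNat (0 : Int)) = xs := by
  by_cases hk : k ≤ 0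
  · have : k.toNat = 0 := by omega
    rw [PySem.List.pyRange_one_eq_nil hk]
    simp only [List.foldl_nil, this, List.replicate_zero]
    exact (List.eq_nil_of_length_eq_zero (by omega)).symm
  · have hkk : k = ((k.toNat : Nat) : Int) := by omega
    rw [hkk]
    simp only [Int.toNat_natCast]
    rw [pvCopyAux xs k.toNat h.symm.le (List.replicate k.toNat 0) (by simp [h])]
    simp [List.take_of_length_le h.le, List.drop_replicate]

lemma pvOcc_append (K c : Nat) (X : List Int) (a : Int) (s : Nat) :
    pvOcc K c (X ++ [a]) s =
      pvOcc K c X s ++ (if pvNidx K (a - 1) = c then [((s + X.length : Nat) : Int)] else []) := by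
  unfold pvOcc
  rw [List.zipIdx_append, List.filter_append, List.map_append]
  congr 1
  by_cases h : pvNidx K (a - 1) = c <;> simp [h]

lemma pvOcc_bounds (K c : Nat) (X : List Int) (s : Nat) :
    ∀ x ∈ pvOcc K c X s, (s : Int) ≤ x ∧ x < (s : Int) + X.length := by
  intro x hx
  simp only [pvOcc, List.mem_map, List.mem_filter] at hx
  obtain ⟨⟨v, i⟩, ⟨hp, _⟩, rfl⟩ := hx
  obtain ⟨h1, h2, _⟩ := List.mem_zipIdx hp
  constructor <;> [exact_mod_cast h1; exact_mod_cast h2]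

lemma pvZipCount (K c : Nat) (X : List Int) (s : Nat) :
    ((X.zipIdx s).countP (fun p => pvNidx K (p.1 - 1) == c)) =
      X.countP (fun a => pvNidx K (a - 1) == c) := by
  induction X generalizing s with
  | nil => simp
  | cons x X ih => simp [List.countP_cons, ih (s + 1)]

lemma pvOcc_length (K c : Nat) (X : List Int) (s : Nat) :
    (pvOcc K c X s).length = X.countP (fun a => pvNidx K (a - 1) == c) := by
  simp only [pvOcc, List.length_map]
  rw [← pvZipCount K c X s, List.countP_eq_length_filter]

lemma pvMat_getD (K : Nat) (X : List Int) (e : Nat) (he : e < K) :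
    (pvMat K X).getD e [] = pvOcc K e X 0 := by
  have h : (pvMat K X)[e]? = some (pvOcc K e X 0) := by
    simp [pvMat, he]
  rw [List.getD_eq_getElem?_getD, h]; rfl

lemma pvFrec_getD (K : Nat) (X : List Int) (e : Nat) (he : e < K) :
    (pvFrec K X).getD e 0 = (X.countP (fun a => pvNidx K (a - 1) == e) : Int) := by
  have h : (pvFrec K X)[e]? = some ((X.countP (fun a => pvNidx K (a - 1) == e) : Int)) := by
    simp [pvFrec, he]
  rw [List.getD_eq_getElem?_getD, h]; rfl

lemma pvMat_append (K : Nat) (X : List Int) (a : Int)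
    (he : pvNidx K (a - 1) < K) :
    pvMat K (X ++ [a]) =
      (pvMat K X).set (pvNidx K (a - 1))
        (((pvMat K X).getD (pvNidx K (a - 1)) []) ++ [(X.length : Int)]) := by
  apply List.ext_getElem
  · simp [pvMat]
  · intro c h1 h2
    have hc : c < K := by simpa [pvMat] using h1
    rw [List.getElem_set]
    by_cases h : pvNidx K (a - 1) = c
    · subst h
      rw [if_pos rfl, pvMat_getD K X _ he]
      simp only [pvMat, List.getElem_map, List.getElem_range]
      rw [pvOcc_append]; simp
    · rw [if_neg h]
      simp only [pvMat, List.getElem_map, List.getElem_range]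
      rw [pvOcc_append]; simp [h]

lemma pvFrec_append (K : Nat) (X : List Int) (a : Int)
    (he : pvNidx K (a - 1) < K) :
    pvFrec K (X ++ [a]) =
      (pvFrec K X).set (pvNidx K (a - 1)) (((pvFrec K X).getD (pvNidx K (a - 1)) 0) + 1) := by
  apply List.ext_getElem
  · simp [pvFrec]
  · intro c h1 h2
    have hc : c < K := by simpa [pvFrec] using h1
    rw [List.getElem_set]
    by_cases h : pvNidx K (a - 1) = c
    · subst h
      rw [if_pos rfl, pvFrec_getD K X _ he]
      simp only [pvFrec, List.getElem_map, List.getElem_range]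
      rw [List.countP_append]; simp
    · rw [if_neg h]
      simp only [pvFrec, List.getElem_map, List.getElem_range]
      rw [List.countP_append]; simp [h]

lemma pvFrec_length (K : Nat) (X : List Int) : (pvFrec K X).length = K := by
  simp [pvFrec]

lemma pvMat_length (K : Nat) (X : List Int) : (pvMat K X).length = K := by
  simp [pvMat]

lemma pvQmat_append (K : Nat) (X : List Int) (a : Int) :
    pvQmat K (X ++ [a]) = pvQmat K X ++ [pvFrec K X] := by
  unfold pvQmat
  rw [List.length_append, List.length_singleton, List.range_succ, List.map_append]
  congr 1
  · apply List.map_congr_left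
    intro i hi
    rw [List.take_append_of_le_length (le_of_lt (List.mem_range.mp hi))]
  · simp [List.take_append_of_le_length (le_refl X.length)]

-- range of a Python index that is in range for a list of K classes
lemma pvInRange (k : Int) (a : Int) (h : -k ≤ a - 1 ∧ a - 1 < k) :
    -(k.toNat : Int) ≤ a - 1 ∧ a - 1 < k.toNat := by omega

-- A's loop over the whole list, in Nat-indexed form
lemma pvLoopA (A : List Int) (k : Int) (hpre : Pre_get_matrices A k) :
    (List.range A.length).foldl (fun st (j : Nat) => pvStepA A k st (j : Int))
      (List.replicate k.toNat [], [], List.replicate k.toNat (0 : Int)) =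
      (pvMat k.toNat A, pvQmat k.toNat A, pvFrec k.toNat A) := by
  induction A using List.reverseRecOn with
  | nil =>
    simp [pvMat, pvQmat, pvFrec, pvOcc, List.map_const']
  | append_singleton X a ih =>
    have hpreX : Pre_get_matrices X k := fun b hb => hpre b (List.mem_append_left _ hb)
    have hpa := hpre a (List.mem_append_right _ (List.mem_singleton_self a))
    have hir := pvInRange k a hpa
    have he : pvNidx k.toNat (a - 1) < k.toNat := pvNidx_lt _ _ hir.1 hir.2
    rw [List.length_append, List.length_singleton, List.range_succ, List.foldl_append]
    rw [PySem.List.foldl_congr_mem (List.range X.length) _ (fun st (j : Nat) => pvStepA X k st (j : Int)) _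
      (by
        intro st j hj
        have hjX : j < X.length := List.mem_range.mp hj
        simp only [pvStepA, PySem.List.pyGetD_natCast, List.getD_append _ _ _ _ hjX])]
    rw [ih hpreX]
    simp only [List.foldl_cons, List.foldl_nil, pvStepA, PySem.List.pyGetD_natCast]
    have hga : (X ++ [a]).getD X.length 0 = a := by
      rw [List.getD_eq_getElem?_getD, List.getElem?_append_right (le_refl X.length)]
      simp
    rw [hga]
    refine Prod.ext ?_ (Prod.ext ?_ ?_) <;> simp only
    · rw [pvModAt_inrange _ k.toNat (pvMat_length _ _) _ _ _ hir.1 hir.2,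
        pvMat_append _ _ _ he]
    · rw [pvCopy k (pvFrec k.toNat X) (pvFrec_length _ _), pvQmat_append]
    · rw [pvModAt_inrange _ k.toNat (pvFrec_length _ _) _ _ _ hir.1 hir.2,
        pvFrec_append _ _ _ he]

lemma pvRange_fold {β : Type} (n : Nat) (f : β → Int → β) (init : β) :
    (PySem.List.pyRange 0 (n : Int) 1).foldl f init =
      (List.range n).foldl (fun st (j : Nat) => f st (j : Int)) init := by
  rw [PySem.List.pyRange_zero_nat]; exact List.foldl_map

lemma pvLoopB_mat (A : List Int) (k : Int) (hpre : Pre_get_matrices A k) :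
    (List.range A.length).foldl
      (fun (mat : List (List Int)) (j : Nat) =>
        pvModAt mat (PySem.List.pyGetD A (j : Int) 0 - 1) [] (fun row => row ++ [(j : Int)]))
      (List.replicate k.toNat []) = pvMat k.toNat A := by
  induction A using List.reverseRecOn with
  | nil => simp [pvMat, pvOcc, List.map_const']
  | append_singleton X a ih =>
    have hpreX : Pre_get_matrices X k := fun b hb => hpre b (List.mem_append_left _ hb)
    have hpa := hpre a (List.mem_append_right _ (List.mem_singleton_self a))
    have hir := pvInRange k a hpa
    have he : pvNidx k.toNat (a - 1) < k.toNat := pvNidx_lt _ _ hir.1 hir.2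
    rw [List.length_append, List.length_singleton, List.range_succ, List.foldl_append]
    rw [PySem.List.foldl_congr_mem (List.range X.length) _
      (fun (mat : List (List Int)) (j : Nat) =>
        pvModAt mat (PySem.List.pyGetD X (j : Int) 0 - 1) [] (fun row => row ++ [(j : Int)])) _
      (by
        intro mat j hj
        have hjX : j < X.length := List.mem_range.mp hj
        simp only [PySem.List.pyGetD_natCast, List.getD_append _ _ _ _ hjX])]
    rw [ih hpreX]
    simp only [List.foldl_cons, List.foldl_nil, PySem.List.pyGetD_natCast]
    have hga : (X ++ [a]).getD X.length 0 = a := by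
      rw [List.getD_eq_getElem?_getD, List.getElem?_append_right (le_refl X.length)]
      simp
    rw [hga, pvModAt_inrange _ k.toNat (pvMat_length _ _) _ _ _ hir.1 hir.2,
      pvMat_append _ _ _ he]

lemma pvOcc_append2 (K c : Nat) (X Y : List Int) (s : Nat) :
    pvOcc K c (X ++ Y) s = pvOcc K c X s ++ pvOcc K c Y (s + X.length) := by
  unfold pvOcc
  rw [List.zipIdx_append, List.filter_append, List.map_append]

lemma pvCount_occ (K c : Nat) (A : List Int) (i : Nat) (hi : i ≤ A.length) :
    (pvOcc K c A 0).countP (fun x => decide (x < (i : Int))) =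
      (A.take i).countP (fun a => pvNidx K (a - 1) == c) := by
  conv_lhs => rw [← List.take_append_drop i A]
  rw [pvOcc_append2, List.countP_append]
  have hlen : (A.take i).length = i := List.length_take_of_le hi
  have h1 : (pvOcc K c (A.take i) 0).countP (fun x => decide (x < (i : Int))) =
      (pvOcc K c (A.take i) 0).length := by
    apply List.countP_eq_length.mpr
    intro x hx
    have := (pvOcc_bounds K c (A.take i) 0 x hx).2
    rw [hlen] at this
    simpa using by exact_mod_cast (by simpa using this)
  have h2 : (pvOcc K c (A.drop i) (0 + (A.take i).length)).countP
      (fun x => decide (x < (i : Int))) = 0 := by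
    apply List.countP_eq_zero.mpr
    intro x hx
    have := (pvOcc_bounds K c (A.drop i) _ x hx).1
    rw [hlen] at this
    simp only [decide_eq_true_eq]
    push_cast at this ⊢
    omega
  rw [h1, h2, pvOcc_length]
  omega

-- ===== VERDICT (by name: the statement is the Claim_ definition above) =====
theorem get_matrices_spec : Claim_equal_get_matrices := by
  intro A k hdom hpre
  unfold Spec_get_matrices get_matrices get_matrices_alt
  simp only
  rw [pvRange_fold, pvRange_fold, pvLoopA A k hpre, pvLoopB_mat A k hpre]
  simp only
  congr 1
  -- quantity matrices agree
  rw [PySem.List.pyRange_zero_nat, List.map_map]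
  unfold pvQmat
  apply List.map_congr_left
  intro j hj
  have hjn : j < A.length := List.mem_range.mp hj
  by_cases hk : k ≤ 0
  · -- impossible: a j-th element exists, so Pre_ forces 0 < k
    have hpa := hpre (A[j]) (List.getElem_mem hjn)
    omega
  · have hkk : k = ((k.toNat : Nat) : Int) := by omega
    simp only [Function.comp_apply]
    conv_rhs => rw [hkk]
    rw [PySem.List.pyRange_zero_nat, List.map_map]
    simp only [Int.toNat_natCast]
    unfold pvFrec
    apply List.map_congr_left
    intro c hc
    have hcK : c < k.toNat := List.mem_range.mp hc
    symm
    rw [Function.comp_apply, PySem.List.pyGetD_natCast, pvMat_getD _ _ _ hcK,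
      PySem.List.foldl_ite_add_one (fun x => x < (j : Int)),
      pvCount_occ _ _ _ _ (le_of_lt hjn)]
    simp
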